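-- pv_equiv track=rewrite | github.com/mr55p-dev/PyChess | Chess/state.py | __parse_castle
-- ===== SOURCE A (Python) =====
-- from typing import Dict, List, Tuple
--
-- def __parse_castle(castle_str) -> List[bool]:
--     """__parse_castle.
--     Turn the castling move notation from FEN strings into
--     the representation used by Board.
--
--     :param self:
--     :param castle_str:
--     :rtype: List[bool]
--     """
--     castling = [False, False, False, False]
--     if castle_str == "-": return castling
--
--     for i in castle_str:
--         if i == "K": castling[0]    = True
--         elif i == "Q": castling[1]  = True
--         elif i == "k": castling[2]  = True
--         elif i == "q": castling[3]  = True
--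
--     return castling
-- ===== SOURCE B (Python) =====
-- from typing import List
--
-- def __parse_castle(castle_str) -> List[bool]:
--     """Membership test per castling key over the fixed alphabet "KQkq"."""
--     return [c in castle_str for c in "KQkq"]
-- ===== Notes on version B (the rewrite author's own statement) =====
-- stated objective: idiomatic
-- what changed: B iterates over the four fixed castling keys with one substring-membership test each and builds the list directly, instead of A's loop over the input string branch-dispatching into a mutable accumulator; the dash special case disappears since membership already yields all-False there.
import Mathlib
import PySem

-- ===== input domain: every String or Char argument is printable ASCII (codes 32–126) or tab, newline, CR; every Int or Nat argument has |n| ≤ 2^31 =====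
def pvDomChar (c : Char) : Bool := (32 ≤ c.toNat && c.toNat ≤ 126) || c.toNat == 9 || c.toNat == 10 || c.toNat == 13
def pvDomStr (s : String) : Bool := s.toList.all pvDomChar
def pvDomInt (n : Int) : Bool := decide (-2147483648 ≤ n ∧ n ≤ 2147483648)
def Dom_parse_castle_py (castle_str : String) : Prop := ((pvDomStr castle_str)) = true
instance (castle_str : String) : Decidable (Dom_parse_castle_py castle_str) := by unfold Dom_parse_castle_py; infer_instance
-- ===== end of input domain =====

-- B builds the result by membership tests over the fixed alphabet "KQkq" instead of
-- A's branch-dispatch loop over the input into a mutable list (idiomatic rewrite).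


-- ===== PORT A =====
-- the loop body: assignment into the fixed index of the castling list
def pvCastleStep (castling : List Bool) (i : Char) : List Bool :=
  if i = 'K' then castling.set 0 true
  else if i = 'Q' then castling.set 1 true
  else if i = 'k' then castling.set 2 true
  else if i = 'q' then castling.set 3 true
  else castling

def parse_castle_py (castle_str : String) : List Bool :=
  let castling := [false, false, false, false]
  if castle_str = "-" then castling
  else castle_str.toList.foldl pvCastleStep castling

-- ===== PORT B =====
def parse_castle_py_alt (castle_str : String) : List Bool :=
  "KQkq".toList.map (fun c => decide (c ∈ castle_str.toList))

-- ===== PRECONDITION & SPEC =====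
def Spec_parse_castle_py (castle_str : String) (out : List Bool) : Prop := out = parse_castle_py_alt castle_str
instance (castle_str : String) (out : List Bool) : Decidable (Spec_parse_castle_py castle_str out) := by unfold Spec_parse_castle_py; infer_instance

-- ===== CLAIM (what is proved, stated in full; the proofs are below) =====
def Claim_equal_parse_castle_py : Prop := ∀ (castle_str : String), Dom_parse_castle_py castle_str → Spec_parse_castle_py castle_str (parse_castle_py castle_str)

-- ===== LEMMAS AND PROOFS =====

-- invariant of A's loop: each slot is its initial value OR'd with how far the letter occurs
theorem pvCastleStep_foldl (cs : List Char) (a b c d : Bool) :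
    cs.foldl pvCastleStep [a, b, c, d] =
      [a || decide ('K' ∈ cs), b || decide ('Q' ∈ cs),
       c || decide ('k' ∈ cs), d || decide ('q' ∈ cs)] := by
  induction cs generalizing a b c d with
  | nil => simp
  | cons x xs ih =>
    simp only [List.foldl_cons, pvCastleStep]
    split_ifs with h1 h2 h3 h4
    · subst h1; simp only [List.set]; rw [ih]; simp
    · subst h2; simp only [List.set]; rw [ih]; simp
    · subst h3; simp only [List.set]; rw [ih]; simp
    · subst h4; simp only [List.set]; rw [ih]; simp
    · rw [ih]; simp [Ne.symm h1, Ne.symm h2, Ne.symm h3, Ne.symm h4]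

theorem parse_castle_eq (s : String) : parse_castle_py s = parse_castle_py_alt s := by
  unfold parse_castle_py parse_castle_py_alt
  by_cases h : s = "-"
  · subst h; decide
  · simp only [h, if_false]
    rw [pvCastleStep_foldl, show ("KQkq".toList) = ['K','Q','k','q'] from rfl]
    simp [List.map]

-- ===== VERDICT (by name: the statement is the Claim_ definition above) =====
theorem parse_castle_py_spec : Claim_equal_parse_castle_py := by
  intro s _
  exact parse_castle_eq s
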